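-- pv_equiv track=rewrite | github.com/ps0394/Clipper | retrievability/access_gate_evaluator.py | _check_robots_txt_blocked
-- ===== SOURCE A (Python) =====
-- def _check_robots_txt_blocked(robots_text: str, path: str) -> bool:
--     """Parse robots.txt and check if the path is blocked for generic agents.
--
--     Respects User-agent directives: only considers rules under User-agent: *
--     (the wildcard block that applies to unnamed/generic crawlers).
--
--     Args:
--         robots_text: Raw robots.txt content
--         path: URL path to check (e.g. '/docs/overview')
--
--     Returns:
--         True if the path is disallowed for generic agents
--     """
--     in_wildcard_block = False
--     wildcard_rules = []  # List of (allow: bool, path_pattern: str)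
--
--     for line in robots_text.splitlines():
--         line = line.split('#', 1)[0].strip()  # Strip comments
--         if not line:
--             continue
--
--         lower_line = line.lower()
--
--         if lower_line.startswith('user-agent:'):
--             agent = line.split(':', 1)[1].strip()
--             in_wildcard_block = agent == '*'
--         elif in_wildcard_block:
--             if lower_line.startswith('disallow:'):
--                 rule_path = line.split(':', 1)[1].strip()
--                 if rule_path:  # Empty Disallow means allow all
--                     wildcard_rules.append((False, rule_path))
--             elif lower_line.startswith('allow:'):
--                 rule_path = line.split(':', 1)[1].strip()
--                 if rule_path:
--                     wildcard_rules.append((True, rule_path))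
--
--     # Match rules: longest matching path wins (standard robots.txt precedence)
--     best_match_len = -1
--     is_allowed = True  # Default: allowed if no rules match
--
--     for allowed, rule_path in wildcard_rules:
--         if path.startswith(rule_path) and len(rule_path) > best_match_len:
--             best_match_len = len(rule_path)
--             is_allowed = allowed
--
--     return not is_allowed
-- ===== SOURCE B (Python) =====
-- def _check_robots_txt_blocked(robots_text: str, path: str) -> bool:
--     """Single streaming pass: no intermediate rules list; the longest-match
--     precedence is maintained on the fly while parsing."""
--     in_wildcard_block = False
--     best_match_len = -1
--     is_allowed = True
--
--     for raw in robots_text.splitlines():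
--         line = raw.split('#', 1)[0].strip()
--         if not line:
--             continue
--         lower_line = line.lower()
--         if lower_line.startswith('user-agent:'):
--             in_wildcard_block = line.split(':', 1)[1].strip() == '*'
--         elif in_wildcard_block:
--             is_allow_rule = lower_line.startswith('allow:')
--             if is_allow_rule or lower_line.startswith('disallow:'):
--                 rule_path = line.split(':', 1)[1].strip()
--                 if rule_path and path.startswith(rule_path) and len(rule_path) > best_match_len:
--                     best_match_len = len(rule_path)
--                     is_allowed = is_allow_rule
--
--     return not is_allowed
-- ===== Notes on version B (the rewrite author's own statement) =====
-- stated objective: simpler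
-- what changed: Drops the intermediate wildcard_rules list and the second matching loop: best_match_len/is_allowed are updated on the fly during the single line-parsing pass, with one merged Allow/Disallow branch.
import Mathlib
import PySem

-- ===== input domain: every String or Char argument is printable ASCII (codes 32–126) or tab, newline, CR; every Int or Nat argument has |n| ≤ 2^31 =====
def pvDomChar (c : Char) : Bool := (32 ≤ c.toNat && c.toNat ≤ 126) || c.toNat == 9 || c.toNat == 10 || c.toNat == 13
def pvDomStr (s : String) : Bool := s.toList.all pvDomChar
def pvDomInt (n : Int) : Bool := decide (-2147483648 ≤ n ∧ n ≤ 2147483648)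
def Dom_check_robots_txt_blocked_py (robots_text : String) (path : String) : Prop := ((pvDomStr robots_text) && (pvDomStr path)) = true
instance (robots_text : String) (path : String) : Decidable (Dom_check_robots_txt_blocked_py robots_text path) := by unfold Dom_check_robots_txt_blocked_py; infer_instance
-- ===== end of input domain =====

-- B folds A's separate longest-match loop into the single line-parsing pass (no rules list); objective: simpler.


-- ===== PORT A =====
-- line.split('#', 1)[0].strip(); split with sep ≠ "" always yields a nonempty list, so [0] never raises
def pvStripLine (raw : String) : String :=
  PySem.Str.strip (((PySem.Str.splitMax? raw "#" 1).getD []).headD "")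

-- line.split(':', 1)[1].strip(); only called on lines that contain ':', so [1] never raises
def pvAfterColon (line : String) : String :=
  PySem.Str.strip (((PySem.Str.splitMax? line ":" 1).getD []).getD 1 "")

-- parsing loop of A: state = (in_wildcard_block, wildcard_rules)
def pvALineStep (st : Bool × List (Bool × String)) (raw : String) : Bool × List (Bool × String) :=
  let line := pvStripLine raw
  if line = "" then st
  else
    let lower_line := PySem.Str.lower line
    if PySem.Str.startswith lower_line "user-agent:" then
      (pvAfterColon line == "*", st.2)
    else if st.1 then
      if PySem.Str.startswith lower_line "disallow:" then
        let rule_path := pvAfterColon line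
        if rule_path ≠ "" then (st.1, st.2 ++ [(false, rule_path)]) else st
      else if PySem.Str.startswith lower_line "allow:" then
        let rule_path := pvAfterColon line
        if rule_path ≠ "" then (st.1, st.2 ++ [(true, rule_path)]) else st
      else st
    else st

-- matching loop of A: state = (best_match_len, is_allowed)
def pvAMatchStep (path : String) (st : Int × Bool) (rule : Bool × String) : Int × Bool :=
  if PySem.Str.startswith path rule.2 ∧ PySem.Str.len rule.2 > st.1
  then (PySem.Str.len rule.2, rule.1) else st

def check_robots_txt_blocked_py (robots_text : String) (path : String) : Bool :=
  let st := (PySem.Str.splitlines robots_text).foldl pvALineStep (false, [])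
  let m := st.2.foldl (pvAMatchStep path) (-1, true)
  !m.2

-- ===== PORT B =====
-- single streaming pass of B: state = (in_wildcard_block, best_match_len, is_allowed)
def pvBLineStep (path : String) (st : Bool × Int × Bool) (raw : String) : Bool × Int × Bool :=
  let line := pvStripLine raw
  if line = "" then st
  else
    let lower_line := PySem.Str.lower line
    if PySem.Str.startswith lower_line "user-agent:" then
      (pvAfterColon line == "*", st.2)
    else if st.1 then
      let is_allow_rule := PySem.Str.startswith lower_line "allow:"
      if is_allow_rule || PySem.Str.startswith lower_line "disallow:" then
        let rule_path := pvAfterColon line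
        if rule_path ≠ "" ∧ PySem.Str.startswith path rule_path ∧ PySem.Str.len rule_path > st.2.1
        then (st.1, PySem.Str.len rule_path, is_allow_rule) else st
      else st
    else st

def check_robots_txt_blocked_py_alt (robots_text : String) (path : String) : Bool :=
  let st := (PySem.Str.splitlines robots_text).foldl (pvBLineStep path) (false, -1, true)
  !st.2.2

-- ===== PRECONDITION & SPEC =====
def Spec_check_robots_txt_blocked_py (robots_text : String) (path : String) (out : Bool) : Prop := out = check_robots_txt_blocked_py_alt robots_text path
instance (robots_text : String) (path : String) (out : Bool) : Decidable (Spec_check_robots_txt_blocked_py robots_text path out) := by unfold Spec_check_robots_txt_blocked_py; infer_instance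

-- ===== CLAIM (what is proved, stated in full; the proofs are below) =====
def Claim_equal_check_robots_txt_blocked_py : Prop := ∀ (robots_text : String) (path : String), Dom_check_robots_txt_blocked_py robots_text path → Spec_check_robots_txt_blocked_py robots_text path (check_robots_txt_blocked_py robots_text path)

-- ===== LEMMAS AND PROOFS =====

-- a line cannot start with both "allow:" and "disallow:"
theorem pv_not_both (s : String) :
    ¬(PySem.Str.startswith s "allow:" = true ∧ PySem.Str.startswith s "disallow:" = true) := by
  rintro ⟨h1, h2⟩
  simp only [PySem.Str.startswith_eq, PySem.Chars.startswith_iff] at h1 h2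
  obtain ⟨t1, e1⟩ := h1
  obtain ⟨t2, e2⟩ := h2
  rw [← e2] at e1
  simp at e1

-- one line of A: the wildcard flag does not depend on the accumulated rules …
theorem pvAStep_fst (st : Bool × List (Bool × String)) (raw : String) :
    (pvALineStep st raw).1 = (pvALineStep (st.1, []) raw).1 := by
  obtain ⟨wc, rules⟩ := st
  simp only [pvALineStep]
  split_ifs <;> simp

-- … and the rules grow by appending the rules the line emits from an empty start
theorem pvAStep_snd (st : Bool × List (Bool × String)) (raw : String) :
    (pvALineStep st raw).2 = st.2 ++ (pvALineStep (st.1, []) raw).2 := by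
  obtain ⟨wc, rules⟩ := st
  simp only [pvALineStep]
  split_ifs <;> simp

-- one line of B = one line of A followed by matching the freshly emitted rules
theorem pvBStep_eq (path raw : String) (st : Bool × Int × Bool) :
    pvBLineStep path st raw
      = ((pvALineStep (st.1, []) raw).1,
         (pvALineStep (st.1, []) raw).2.foldl (pvAMatchStep path) st.2) := by
  obtain ⟨wc, best, allowed⟩ := st
  simp only [pvBLineStep, pvALineStep]
  generalize pvStripLine raw = line
  by_cases h0 : line = ""
  · rw [if_pos h0, if_pos h0]; rfl
  · rw [if_neg h0, if_neg h0]
    generalize pvAfterColon line = rp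
    generalize PySem.Str.lower line = low
    cases hua : PySem.Str.startswith low "user-agent:" with
    | true => simp
    | false =>
      simp only [Bool.false_eq_true, if_false]
      cases wc with
      | false => simp
      | true =>
        simp only [if_true]
        cases hA : PySem.Str.startswith low "allow:" with
        | true =>
          have hD : PySem.Str.startswith low "disallow:" = false := by
            cases hD : PySem.Str.startswith low "disallow:" with
            | true => exact absurd ⟨hA, hD⟩ (pv_not_both low)
            | false => rfl
          simp only [hD, Bool.true_or, if_true, Bool.false_eq_true, if_false]
          by_cases hrp : rp = ""
          · simp [hrp]
          · simp only [hrp, ne_eq, not_false_iff, if_pos]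
            split_ifs <;> simp_all [pvAMatchStep]
        | false =>
          simp only [Bool.false_or, Bool.false_eq_true, if_false]
          cases hD : PySem.Str.startswith low "disallow:" with
          | true =>
            simp only [if_true]
            by_cases hrp : rp = ""
            · simp [hrp]
            · simp only [hrp, ne_eq, not_false_iff, if_pos]
              split_ifs <;> simp_all [pvAMatchStep]
          | false => simp

-- A's parsing fold: the wildcard flag is rules-independent, rules accumulate by append
theorem pvAFold_split (lines : List String) : ∀ (st : Bool × List (Bool × String)),
    lines.foldl pvALineStep st
      = ((lines.foldl pvALineStep (st.1, [])).1,
         st.2 ++ (lines.foldl pvALineStep (st.1, [])).2) := by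
  induction lines with
  | nil => intro st; simp
  | cons l ls ih =>
    intro st
    simp only [List.foldl_cons]
    rw [ih (pvALineStep st l), ih (pvALineStep (st.1, []) l),
        pvAStep_fst st l, pvAStep_snd st l]
    simp [List.append_assoc]

-- main invariant: B's fold = A's parse fold followed by A's match fold
theorem pvBFold_eq (path : String) (lines : List String) : ∀ (st : Bool × Int × Bool),
    lines.foldl (pvBLineStep path) st
      = ((lines.foldl pvALineStep (st.1, [])).1,
         (lines.foldl pvALineStep (st.1, [])).2.foldl (pvAMatchStep path) st.2) := by
  induction lines with
  | nil => intro st; simp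
  | cons l ls ih =>
    intro st
    simp only [List.foldl_cons]
    rw [pvBStep_eq path l st,
        ih ((pvALineStep (st.1, []) l).1,
            (pvALineStep (st.1, []) l).2.foldl (pvAMatchStep path) st.2),
        pvAFold_split ls (pvALineStep (st.1, []) l),
        pvAStep_fst (st.1, []) l, pvAStep_snd (st.1, []) l]
    simp [List.foldl_append]

-- ===== VERDICT (by name: the statement is the Claim_ definition above) =====
theorem check_robots_txt_blocked_py_spec : Claim_equal_check_robots_txt_blocked_py := by
  intro robots_text path _
  unfold Spec_check_robots_txt_blocked_py
  unfold check_robots_txt_blocked_py check_robots_txt_blocked_py_alt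
  rw [pvBFold_eq path (PySem.Str.splitlines robots_text) (false, -1, true)]
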